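-- pv_equiv track=rewrite | github.com/cry999/AtCoder | beginner/064/C.py | colorful_leaderboard
-- ===== SOURCE A (Python) =====
-- def colorful_leaderboard(N: int, A: list)->tuple:
--     rates = {
--         '0001-0399': False,
--         '0400-0799': False,
--         '0800-1199': False,
--         '1200-1599': False,
--         '1600-1999': False,
--         '2000-2399': False,
--         '2400-2799': False,
--         '2800-3199': False,
--     }
--     wildcard = 0
--
--     for a in A:
--         if a < 400:
--             rates['0001-0399'] = True
--         elif a < 800:
--             rates['0400-0799'] = True
--         elif a < 1200:
--             rates['0800-1199'] = True
--         elif a < 1600: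
--             rates['1200-1599'] = True
--         elif a < 2000:
--             rates['1600-1999'] = True
--         elif a < 2400:
--             rates['2000-2399'] = True
--         elif a < 2800:
--             rates['2400-2799'] = True
--         elif a < 3200:
--             rates['2800-3299'] = True
--         else:
--             wildcard += 1
--
--     rated_colors = sum(rates.values())
--
--     return rated_colors if rated_colors > 0 else 1, rated_colors + wildcard
-- ===== SOURCE B (Python) =====
-- def colorful_leaderboard(N: int, A: list) -> tuple:
--     def in_band(a, i):
--         return a < 400 if i == 0 else 400 * i <= a < 400 * (i + 1)
--     rated = sum(any(in_band(a, i) for a in A) for i in range(8))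
--     wildcard = sum(a >= 3200 for a in A)
--     return (rated if rated else 1, rated + wildcard)
-- ===== Notes on version B (the rewrite author's own statement) =====
-- stated objective: alternative
-- what changed: Inverts the loop structure: instead of one pass over the ratings updating an 8-key boolean dict plus a wildcard counter, B loops over the 8 rating bands and for each band asks any() over the list whether some rating falls in it, plus a separate pass counting ratings >= 3200; no per-element flag state is maintained at all.
import Mathlib
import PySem

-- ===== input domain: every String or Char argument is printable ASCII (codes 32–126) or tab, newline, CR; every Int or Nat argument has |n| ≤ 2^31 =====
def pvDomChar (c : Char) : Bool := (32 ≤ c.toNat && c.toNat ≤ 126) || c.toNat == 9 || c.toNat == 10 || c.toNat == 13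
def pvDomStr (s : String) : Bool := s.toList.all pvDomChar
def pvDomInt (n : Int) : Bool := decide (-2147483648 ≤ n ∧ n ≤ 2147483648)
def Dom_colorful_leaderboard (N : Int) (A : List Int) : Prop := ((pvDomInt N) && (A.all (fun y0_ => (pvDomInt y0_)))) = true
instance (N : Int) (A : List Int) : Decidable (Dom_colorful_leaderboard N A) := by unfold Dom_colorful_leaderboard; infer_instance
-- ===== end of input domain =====

-- B inverts the loop structure: instead of one pass over the ratings updating an 8-key boolean
-- dict plus a wildcard counter, it loops over the 8 bands, asking any() over the list for each,
-- and counts ratings >= 3200 in a separate pass; objective: alternative. Return value only.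

-- ===== PORT A =====
-- the body of A's for-loop, as a named step function over the loop state (rates dict, wildcard)
def pvStepA (st : PySem.Dict String Bool × Int) (a : Int) : PySem.Dict String Bool × Int :=
  if a < 400 then (st.1.insert "0001-0399" true, st.2)
  else if a < 800 then (st.1.insert "0400-0799" true, st.2)
  else if a < 1200 then (st.1.insert "0800-1199" true, st.2)
  else if a < 1600 then (st.1.insert "1200-1599" true, st.2)
  else if a < 2000 then (st.1.insert "1600-1999" true, st.2)
  else if a < 2400 then (st.1.insert "2000-2399" true, st.2)
  else if a < 2800 then (st.1.insert "2400-2799" true, st.2)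
  else if a < 3200 then (st.1.insert "2800-3299" true, st.2)
  else (st.1, st.2 + 1)

def colorful_leaderboard (N : Int) (A : List Int) : Int × Int :=
  let rates : PySem.Dict String Bool := PySem.Dict.ofList
    [("0001-0399", false), ("0400-0799", false), ("0800-1199", false), ("1200-1599", false),
     ("1600-1999", false), ("2000-2399", false), ("2400-2799", false), ("2800-3199", false)]
  let st := A.foldl pvStepA (rates, 0)
  -- sum(rates.values()) over booleans: True counts as 1
  let rated_colors : Int := (st.1.values.map (fun b => if b then (1 : Int) else 0)).sum
  (if rated_colors > 0 then rated_colors else 1, rated_colors + st.2)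

-- ===== PORT B =====
-- in_band(a, i): a < 400 for band 0, else 400*i <= a < 400*(i+1)
def pvInBand (a i : Int) : Bool :=
  if i = 0 then decide (a < 400) else decide (400 * i ≤ a ∧ a < 400 * (i + 1))

def colorful_leaderboard_alt (N : Int) (A : List Int) : Int × Int :=
  let rated : Int :=
    ((PySem.List.pyRange 0 8 1).map
      (fun i => if A.any (fun a => pvInBand a i) then (1 : Int) else 0)).sum
  let wildcard : Int := (A.map (fun a => if 3200 ≤ a then (1 : Int) else 0)).sum
  (if rated ≠ 0 then rated else 1, rated + wildcard)

-- ===== PRECONDITION & SPEC =====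
def Spec_colorful_leaderboard (N : Int) (A : List Int) (out : Int × Int) : Prop := out = colorful_leaderboard_alt N A
instance (N : Int) (A : List Int) (out : Int × Int) : Decidable (Spec_colorful_leaderboard N A out) := by unfold Spec_colorful_leaderboard; infer_instance

-- ===== CLAIM (what is proved, stated in full; the proofs are below) =====
def Claim_equal_colorful_leaderboard : Prop := ∀ (N : Int) (A : List Int), Dom_colorful_leaderboard N A → Spec_colorful_leaderboard N A (colorful_leaderboard N A)

-- ===== LEMMAS AND PROOFS =====

-- the dict A's loop maintains, parametrised by the set of band indices seen so far
def pvG (S : List Int) : PySem.Dict String Bool := PySem.Dict.mk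
  ([("0001-0399", decide ((0:Int) ∈ S)), ("0400-0799", decide ((1:Int) ∈ S)),
    ("0800-1199", decide ((2:Int) ∈ S)), ("1200-1599", decide ((3:Int) ∈ S)),
    ("1600-1999", decide ((4:Int) ∈ S)), ("2000-2399", decide ((5:Int) ∈ S)),
    ("2400-2799", decide ((6:Int) ∈ S)), ("2800-3199", false)]
   ++ if (7:Int) ∈ S then [("2800-3299", true)] else [])

theorem pvG_empty : PySem.Dict.ofList
    [("0001-0399", false), ("0400-0799", false), ("0800-1199", false), ("1200-1599", false),
     ("1600-1999", false), ("2000-2399", false), ("2400-2799", false), ("2800-3199", false)]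
    = pvG [] := by decide

theorem pvG_insert0 (S : List Int) : (pvG S).insert "0001-0399" true = pvG (PySem.Set.add S 0) := by
  by_cases h7 : (7:Int) ∈ S <;>
    simp [pvG, PySem.Dict.insert, PySem.Dict.contains, PySem.Set.add, PySem.Set.contains, h7] <;>
    (try split_ifs with hm) <;> simp_all

theorem pvG_insert1 (S : List Int) : (pvG S).insert "0400-0799" true = pvG (PySem.Set.add S 1) := by
  by_cases h7 : (7:Int) ∈ S <;>
    simp [pvG, PySem.Dict.insert, PySem.Dict.contains, PySem.Set.add, PySem.Set.contains, h7] <;>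
    (try split_ifs with hm) <;> simp_all

theorem pvG_insert2 (S : List Int) : (pvG S).insert "0800-1199" true = pvG (PySem.Set.add S 2) := by
  by_cases h7 : (7:Int) ∈ S <;>
    simp [pvG, PySem.Dict.insert, PySem.Dict.contains, PySem.Set.add, PySem.Set.contains, h7] <;>
    (try split_ifs with hm) <;> simp_all

theorem pvG_insert3 (S : List Int) : (pvG S).insert "1200-1599" true = pvG (PySem.Set.add S 3) := by
  by_cases h7 : (7:Int) ∈ S <;>
    simp [pvG, PySem.Dict.insert, PySem.Dict.contains, PySem.Set.add, PySem.Set.contains, h7] <;>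
    (try split_ifs with hm) <;> simp_all

theorem pvG_insert4 (S : List Int) : (pvG S).insert "1600-1999" true = pvG (PySem.Set.add S 4) := by
  by_cases h7 : (7:Int) ∈ S <;>
    simp [pvG, PySem.Dict.insert, PySem.Dict.contains, PySem.Set.add, PySem.Set.contains, h7] <;>
    (try split_ifs with hm) <;> simp_all

theorem pvG_insert5 (S : List Int) : (pvG S).insert "2000-2399" true = pvG (PySem.Set.add S 5) := by
  by_cases h7 : (7:Int) ∈ S <;>
    simp [pvG, PySem.Dict.insert, PySem.Dict.contains, PySem.Set.add, PySem.Set.contains, h7] <;>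
    (try split_ifs with hm) <;> simp_all

theorem pvG_insert6 (S : List Int) : (pvG S).insert "2400-2799" true = pvG (PySem.Set.add S 6) := by
  by_cases h7 : (7:Int) ∈ S <;>
    simp [pvG, PySem.Dict.insert, PySem.Dict.contains, PySem.Set.add, PySem.Set.contains, h7] <;>
    (try split_ifs with hm) <;> simp_all

theorem pvG_insert7 (S : List Int) : (pvG S).insert "2800-3299" true = pvG (PySem.Set.add S 7) := by
  by_cases h7 : (7:Int) ∈ S <;>
    simp [pvG, PySem.Dict.insert, PySem.Dict.contains, PySem.Set.add, PySem.Set.contains, h7] <;>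
    (try split_ifs with hm) <;> simp_all

-- band index of a rating below 3200
theorem pvBand_eq (a : Int) (i : Int) (hi : 0 ≤ i) (hlo : i * 400 ≤ a ∨ i = 0) (hhi : a < (i+1) * 400) :
    max 0 (PySem.Int.floordiv a 400) = i := by
  rcases hlo with hlo | rfl
  · have : PySem.Int.floordiv a 400 = i :=
      (PySem.Int.floordiv_eq_iff_of_pos (by omega)).2 ⟨hlo, hhi⟩
    omega
  · have : PySem.Int.floordiv a 400 < 1 :=
      (PySem.Int.floordiv_lt_iff_lt_mul (by omega)).2 (by omega)
    omega

-- A's loop over the dict pvG S evolves by adding band indices / counting wildcards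
theorem pvFoldA (A : List Int) : ∀ (S : List Int) (w : Int),
    A.foldl pvStepA (pvG S, w)
      = (pvG (A.foldl (fun s a => if a < 3200 then PySem.Set.add s (max 0 (PySem.Int.floordiv a 400)) else s) S),
         w + ((A.filter (fun a => 3200 ≤ a)).length : Int)) := by
  induction A with
  | nil => intro S w; simp
  | cons a t ih =>
    intro S w
    by_cases h0 : a < 400
    · have hb2 : (if a < 3200 then PySem.Set.add S (max 0 (PySem.Int.floordiv a 400)) else S)
          = PySem.Set.add S (0 : Int) := by
        rw [if_pos (by omega), pvBand_eq a 0 (by omega) (Or.inr rfl) (by omega)]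
      have hd : (3200 ≤ a) = False := by simp; omega
      simp only [List.foldl_cons, List.filter_cons, hd, decide_false, Bool.false_eq_true,
        if_false, if_true, pvStepA, h0, hb2, pvG_insert0, ih]
    by_cases h1 : a < 800
    · have hb2 : (if a < 3200 then PySem.Set.add S (max 0 (PySem.Int.floordiv a 400)) else S)
          = PySem.Set.add S (1 : Int) := by
        rw [if_pos (by omega), pvBand_eq a 1 (by omega) (Or.inl (by omega)) (by omega)]
      have hd : (3200 ≤ a) = False := by simp; omega
      simp only [List.foldl_cons, List.filter_cons, hd, decide_false, Bool.false_eq_true,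
        if_false, if_true, pvStepA, h0, h1, hb2, pvG_insert1, ih]
    by_cases h2 : a < 1200
    · have hb2 : (if a < 3200 then PySem.Set.add S (max 0 (PySem.Int.floordiv a 400)) else S)
          = PySem.Set.add S (2 : Int) := by
        rw [if_pos (by omega), pvBand_eq a 2 (by omega) (Or.inl (by omega)) (by omega)]
      have hd : (3200 ≤ a) = False := by simp; omega
      simp only [List.foldl_cons, List.filter_cons, hd, decide_false, Bool.false_eq_true,
        if_false, if_true, pvStepA, h0, h1, h2, hb2, pvG_insert2, ih]
    by_cases h3 : a < 1600
    · have hb2 : (if a < 3200 then PySem.Set.add S (max 0 (PySem.Int.floordiv a 400)) else S)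
          = PySem.Set.add S (3 : Int) := by
        rw [if_pos (by omega), pvBand_eq a 3 (by omega) (Or.inl (by omega)) (by omega)]
      have hd : (3200 ≤ a) = False := by simp; omega
      simp only [List.foldl_cons, List.filter_cons, hd, decide_false, Bool.false_eq_true,
        if_false, if_true, pvStepA, h0, h1, h2, h3, hb2, pvG_insert3, ih]
    by_cases h4 : a < 2000
    · have hb2 : (if a < 3200 then PySem.Set.add S (max 0 (PySem.Int.floordiv a 400)) else S)
          = PySem.Set.add S (4 : Int) := by
        rw [if_pos (by omega), pvBand_eq a 4 (by omega) (Or.inl (by omega)) (by omega)]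
      have hd : (3200 ≤ a) = False := by simp; omega
      simp only [List.foldl_cons, List.filter_cons, hd, decide_false, Bool.false_eq_true,
        if_false, if_true, pvStepA, h0, h1, h2, h3, h4, hb2, pvG_insert4, ih]
    by_cases h5 : a < 2400
    · have hb2 : (if a < 3200 then PySem.Set.add S (max 0 (PySem.Int.floordiv a 400)) else S)
          = PySem.Set.add S (5 : Int) := by
        rw [if_pos (by omega), pvBand_eq a 5 (by omega) (Or.inl (by omega)) (by omega)]
      have hd : (3200 ≤ a) = False := by simp; omega
      simp only [List.foldl_cons, List.filter_cons, hd, decide_false, Bool.false_eq_true,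
        if_false, if_true, pvStepA, h0, h1, h2, h3, h4, h5, hb2, pvG_insert5, ih]
    by_cases h6 : a < 2800
    · have hb2 : (if a < 3200 then PySem.Set.add S (max 0 (PySem.Int.floordiv a 400)) else S)
          = PySem.Set.add S (6 : Int) := by
        rw [if_pos (by omega), pvBand_eq a 6 (by omega) (Or.inl (by omega)) (by omega)]
      have hd : (3200 ≤ a) = False := by simp; omega
      simp only [List.foldl_cons, List.filter_cons, hd, decide_false, Bool.false_eq_true,
        if_false, if_true, pvStepA, h0, h1, h2, h3, h4, h5, h6, hb2, pvG_insert6, ih]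
    by_cases h7 : a < 3200
    · have hb2 : (if a < 3200 then PySem.Set.add S (max 0 (PySem.Int.floordiv a 400)) else S)
          = PySem.Set.add S (7 : Int) := by
        rw [if_pos (by omega), pvBand_eq a 7 (by omega) (Or.inl (by omega)) (by omega)]
      have hbv : max 0 (PySem.Int.floordiv a 400) = (7 : Int) :=
        pvBand_eq a 7 (by omega) (Or.inl (by omega)) (by omega)
      have hd : (3200 ≤ a) = False := by simp; omega
      simp only [List.foldl_cons, List.filter_cons, hd, decide_false, Bool.false_eq_true,
        if_false, if_true, pvStepA, h0, h1, h2, h3, h4, h5, h6, h7, hbv, hb2, pvG_insert7, ih]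
    -- wildcard branch: 3200 ≤ a
    have hd : (3200 ≤ a) = True := by simp; omega
    have hn : (a < 3200) = False := by simp; omega
    simp only [List.foldl_cons, List.filter_cons, hd, decide_true, if_true, pvStepA, h0, h1, h2,
      h3, h4, h5, h6, h7, Bool.false_eq_true, if_false, hn, ih, List.length_cons,
      Prod.mk.injEq]
    refine ⟨by trivial, by push_cast; ring⟩

-- membership in the band-index set A's loop builds, as an any() over the list
theorem pvMemFold (A : List Int) : ∀ (S : List Int) (x : Int),
    x ∈ A.foldl (fun s a => if a < 3200 then PySem.Set.add s (max 0 (PySem.Int.floordiv a 400)) else s) S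
      ↔ x ∈ S ∨ (A.any (fun a => decide (a < 3200) && decide (max 0 (PySem.Int.floordiv a 400) = x))) = true := by
  induction A with
  | nil => intro S x; simp
  | cons a t ih =>
    intro S x
    by_cases h : a < 3200
    · simp only [List.foldl_cons, if_pos h, List.any_cons, ih, PySem.Set.mem_add,
        decide_eq_true_eq, Bool.or_eq_true, Bool.and_eq_true]
      constructor
      · rintro (⟨hs | he⟩ | ht)
        · exact Or.inl hs
        · exact Or.inr (Or.inl ⟨by simpa using h, by simpa using he.symm⟩)
        · exact Or.inr (Or.inr ht)
      · rintro (hs | ⟨_, he⟩ | ht)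
        · exact Or.inl (Or.inl hs)
        · exact Or.inl (Or.inr (by simpa using he.symm))
        · exact Or.inr ht
    · simp only [List.foldl_cons, if_neg h, List.any_cons, ih]
      have hx : decide (a < 3200) = false := by simpa using h
      simp [hx]

-- the any-predicate of pvMemFold coincides with B's in_band test, for band indices 0..7
theorem pvAnyBand (a i : Int) (h0 : 0 ≤ i) (h8 : i < 8) :
    (decide (a < 3200) && decide (max 0 (PySem.Int.floordiv a 400) = i)) = pvInBand a i := by
  have hlt : PySem.Int.floordiv a 400 < 1 ↔ a < 1 * 400 :=
    PySem.Int.floordiv_lt_iff_lt_mul (by omega)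
  have heq : PySem.Int.floordiv a 400 = i ↔ i * 400 ≤ a ∧ a < (i + 1) * 400 :=
    PySem.Int.floordiv_eq_iff_of_pos (by omega)
  have hmax2 : max 0 (PySem.Int.floordiv a 400) = 0 ∨
      max 0 (PySem.Int.floordiv a 400) = PySem.Int.floordiv a 400 := max_choice _ _
  have hmax3 : PySem.Int.floordiv a 400 ≤ max 0 (PySem.Int.floordiv a 400) := le_max_right _ _
  have hmax1 : (0:Int) ≤ max 0 (PySem.Int.floordiv a 400) := le_max_left _ _
  rw [Bool.eq_iff_iff]
  by_cases hi : i = 0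
  · subst hi
    simp [pvInBand]
    omega
  · simp [pvInBand, hi]
    omega

-- summing the dict's boolean values = the 8 band-membership indicators
theorem pvValuesSum8 (S : List Int) :
    ((pvG S).values.map (fun b => if b then (1 : Int) else 0)).sum =
      (if (0:Int) ∈ S then (1:Int) else 0) + (if (1:Int) ∈ S then 1 else 0)
      + (if (2:Int) ∈ S then 1 else 0) + (if (3:Int) ∈ S then 1 else 0)
      + (if (4:Int) ∈ S then 1 else 0) + (if (5:Int) ∈ S then 1 else 0)
      + (if (6:Int) ∈ S then 1 else 0) + (if (7:Int) ∈ S then 1 else 0) := by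
  by_cases h0 : (0:Int) ∈ S <;> by_cases h1 : (1:Int) ∈ S <;> by_cases h2 : (2:Int) ∈ S <;>
    by_cases h3 : (3:Int) ∈ S <;> by_cases h4 : (4:Int) ∈ S <;> by_cases h5 : (5:Int) ∈ S <;>
    by_cases h6 : (6:Int) ∈ S <;> by_cases h7 : (7:Int) ∈ S <;>
    simp [pvG, PySem.Dict.values, h0, h1, h2, h3, h4, h5, h6, h7]

-- ===== VERDICT (by name: the statement is the Claim_ definition above) =====
theorem colorful_leaderboard_spec : Claim_equal_colorful_leaderboard := by
  intro N A _
  unfold Spec_colorful_leaderboard colorful_leaderboard colorful_leaderboard_alt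
  simp only []
  rw [pvG_empty, pvFoldA]
  set S := A.foldl (fun s a => if a < 3200 then PySem.Set.add s (max 0 (PySem.Int.floordiv a 400)) else s) [] with hS
  have hmem : ∀ i : Int, 0 ≤ i → i < 8 → ((i ∈ S) ↔ A.any (fun a => pvInBand a i) = true) := by
    intro i hi0 hi8
    rw [hS, pvMemFold]
    simp only [List.not_mem_nil, false_or]
    rw [show (fun a => decide (a < 3200) && decide (max 0 (PySem.Int.floordiv a 400) = i))
          = (fun a => pvInBand a i) from funext fun a => pvAnyBand a i hi0 hi8]
  have hrange : PySem.List.pyRange 0 8 1 = [0, 1, 2, 3, 4, 5, 6, 7] := by decide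
  have hrated : ((pvG S).values.map (fun b => if b then (1 : Int) else 0)).sum
      = ((PySem.List.pyRange 0 8 1).map
          (fun i => if A.any (fun a => pvInBand a i) then (1 : Int) else 0)).sum := by
    rw [pvValuesSum8, hrange]
    simp only [List.map_cons, List.map_nil, List.sum_cons, List.sum_nil, add_zero]
    rw [if_congr (hmem 0 (by omega) (by omega)) rfl rfl,
        if_congr (hmem 1 (by omega) (by omega)) rfl rfl,
        if_congr (hmem 2 (by omega) (by omega)) rfl rfl,
        if_congr (hmem 3 (by omega) (by omega)) rfl rfl,
        if_congr (hmem 4 (by omega) (by omega)) rfl rfl,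
        if_congr (hmem 5 (by omega) (by omega)) rfl rfl,
        if_congr (hmem 6 (by omega) (by omega)) rfl rfl,
        if_congr (hmem 7 (by omega) (by omega)) rfl rfl]
    ring
  have hwc : (A.map (fun a => if 3200 ≤ a then (1 : Int) else 0)).sum
      = ((A.filter (fun a => 3200 ≤ a)).length : Int) := by
    have hfn : (fun a : Int => if 3200 ≤ a then (1 : Int) else 0)
        = (fun a : Int => if decide (3200 ≤ a) = true then (1 : Int) else 0) := by
      funext a; simp
    rw [hfn, PySem.List.sum_map_ite_one_zero, List.countP_eq_length_filter]
  have hr : 0 ≤ ((PySem.List.pyRange 0 8 1).map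
      (fun i => if A.any (fun a => pvInBand a i) then (1 : Int) else 0)).sum := by
    refine List.sum_nonneg ?_
    intro x hx
    obtain ⟨i, _, rfl⟩ := List.mem_map.1 hx
    split <;> norm_num
  rw [hrated, ← hwc]
  set r := ((PySem.List.pyRange 0 8 1).map
      (fun i => if A.any (fun a => pvInBand a i) then (1 : Int) else 0)).sum with hrdef
  refine Prod.ext ?_ (by simp)
  by_cases h : r = 0
  · simp [h]
  · rw [if_pos (show r > 0 by omega), if_pos h]
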